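-- pv_equiv track=rewrite | github.com/reggie-o7/TIP-102 | TIP Unit 2 Problems.py | find_balanced_subsequence
-- ===== SOURCE A (Python) =====
-- def find_balanced_subsequence(art_pieces):
--     ans = 0
--     freq = {}
--     for i in art_pieces:
--         freq[i] = freq.get(i, 0) + 1
--
--     for j in freq:
--         if j + 1 in freq:
--             ans = max(ans, freq[j] + freq[j+1])
--     return ans
-- ===== SOURCE B (Python) =====
-- def find_balanced_subsequence(art_pieces):
--     # Sort, compress equal values into (value, count) runs, then scan
--     # adjacent runs whose values differ by exactly 1.
--     runs = []
--     for x in sorted(art_pieces):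
--         if runs and runs[-1][0] == x:
--             runs[-1] = (x, runs[-1][1] + 1)
--         else:
--             runs.append((x, 1))
--     ans = 0
--     for (v1, c1), (v2, c2) in zip(runs, runs[1:]):
--         if v2 == v1 + 1:
--             ans = max(ans, c1 + c2)
--     return ans
-- ===== Notes on version B (the rewrite author's own statement) =====
-- stated objective: alternative
-- what changed: Replaces the hash-map frequency table and key scan with a sort, a run-length compression of equal values, and a single adjacent-pair scan over the runs.
import Mathlib
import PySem

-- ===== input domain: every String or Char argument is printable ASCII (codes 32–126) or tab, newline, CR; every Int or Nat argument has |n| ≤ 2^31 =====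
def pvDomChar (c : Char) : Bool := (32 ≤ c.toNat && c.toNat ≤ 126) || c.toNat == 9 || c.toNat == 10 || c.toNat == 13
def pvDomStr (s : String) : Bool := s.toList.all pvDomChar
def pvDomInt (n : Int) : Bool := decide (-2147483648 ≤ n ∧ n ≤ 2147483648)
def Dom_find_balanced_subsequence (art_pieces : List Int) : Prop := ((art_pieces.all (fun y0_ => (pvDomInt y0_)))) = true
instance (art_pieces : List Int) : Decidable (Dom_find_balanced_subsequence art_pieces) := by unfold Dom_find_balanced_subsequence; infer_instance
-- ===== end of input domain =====

-- B replaces A's frequency dict + key scan by sort, run-length compression and one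
-- adjacent-pair scan over the runs (alternative decomposition, not claimed faster).

-- ===== PORT A =====
def find_balanced_subsequence (art_pieces : List Int) : Int :=
  -- ans = 0; freq = {}; for i in art_pieces: freq[i] = freq.get(i, 0) + 1
  let freq := art_pieces.foldl (fun d i => d.insert i (d.getD i 0 + 1)) PySem.Dict.empty
  -- for j in freq: if j + 1 in freq: ans = max(ans, freq[j] + freq[j+1])
  freq.keys.foldl
    (fun ans j =>
      if freq.contains (j + 1) then max ans (freq.getD j 0 + freq.getD (j + 1) 0) else ans)
    0

-- ===== PORT B =====
-- run-length compression loop: runs kept in reverse (head = last run), reversed at the end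
def pvRStep (acc : List (Int × Int)) (x : Int) : List (Int × Int) :=
  match acc with
  | (v, c) :: t => if v = x then (x, c + 1) :: t else (x, 1) :: (v, c) :: t
  | [] => [(x, 1)]

-- for (v1, c1), (v2, c2) in zip(runs, runs[1:]): if v2 == v1 + 1: ans = max(ans, c1 + c2)
def pvScanRuns (runs : List (Int × Int)) : Int :=
  (runs.zip runs.tail).foldl
    (fun ans p => if p.2.1 = p.1.1 + 1 then max ans (p.1.2 + p.2.2) else ans)
    0

def find_balanced_subsequence_alt (art_pieces : List Int) : Int :=
  pvScanRuns (((PySem.List.sorted art_pieces (fun x => x) false).foldl pvRStep []).reverse)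

-- ===== PRECONDITION & SPEC =====
def Spec_find_balanced_subsequence (art_pieces : List Int) (out : Int) : Prop := out = find_balanced_subsequence_alt art_pieces
instance (art_pieces : List Int) (out : Int) : Decidable (Spec_find_balanced_subsequence art_pieces out) := by unfold Spec_find_balanced_subsequence; infer_instance

-- ===== CLAIM (what is proved, stated in full; the proofs are below) =====
def Claim_equal_find_balanced_subsequence : Prop := ∀ (art_pieces : List Int), Dom_find_balanced_subsequence art_pieces → Spec_find_balanced_subsequence art_pieces (find_balanced_subsequence art_pieces)

-- ===== LEMMAS AND PROOFS =====

-- the common fold step: both programs reduce to folding this over the distinct values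
def pvStepf (l : List Int) (ans v : Int) : Int :=
  if (v + 1) ∈ l then max ans (l.count v + l.count (v + 1)) else ans

-- recursive spec of the run-length compression (current run value v, count c)
def pvRunsFrom (v : Int) (c : Int) : List Int → List (Int × Int)
  | [] => [(v, c)]
  | x :: xs => if v = x then pvRunsFrom v (c + 1) xs else (v, c) :: pvRunsFrom x 1 xs

theorem pvFoldl_rstep (s : List Int) : ∀ (v c : Int) (acc : List (Int × Int)),
    (s.foldl pvRStep ((v, c) :: acc)).reverse = acc.reverse ++ pvRunsFrom v c s := by
  induction s with
  | nil => intro v c acc; simp [pvRunsFrom]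
  | cons x xs ih =>
    intro v c acc
    simp only [List.foldl_cons]
    by_cases h : v = x
    · subst h
      rw [show pvRStep ((v, c) :: acc) v = (v, c + 1) :: acc by simp [pvRStep]]
      rw [ih v (c + 1) acc]
      simp [pvRunsFrom]
    · rw [show pvRStep ((v, c) :: acc) x = (x, 1) :: (v, c) :: acc by simp [pvRStep, h]]
      rw [ih x 1 ((v, c) :: acc)]
      simp [pvRunsFrom, h]

theorem pvRunsFrom_fst_mem (s : List Int) : ∀ (v c w : Int),
    (w ∈ (pvRunsFrom v c s).map Prod.fst) ↔ (w = v ∨ w ∈ s) := by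
  induction s with
  | nil => intro v c w; simp [pvRunsFrom]
  | cons x xs ih =>
    intro v c w
    by_cases h : v = x
    · subst h; simp [pvRunsFrom, ih]
    · simp [pvRunsFrom, h, ih]

theorem pvRunsFrom_fst_lt (s : List Int) : ∀ (v c : Int),
    s.Pairwise (· ≤ ·) → (∀ y ∈ s, v ≤ y) →
    ((pvRunsFrom v c s).map Prod.fst).Pairwise (· < ·) := by
  induction s with
  | nil => intro v c _ _; simp [pvRunsFrom]
  | cons x xs ih =>
    intro v c hp hle
    rcases List.pairwise_cons.mp hp with ⟨hx, hxs⟩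
    by_cases h : v = x
    · subst h
      simp only [pvRunsFrom]
      exact ih v (c + 1) hxs hx
    · have hvx : v < x := lt_of_le_of_ne (hle x (by simp)) h
      simp only [pvRunsFrom, if_neg h, List.map_cons]
      refine List.pairwise_cons.mpr ⟨?_, ih x 1 hxs hx⟩
      intro w hw
      rcases (pvRunsFrom_fst_mem xs x 1 w).mp hw with h1 | h1
      · omega
      · exact lt_of_lt_of_le hvx (hx w h1)

theorem pvRunsFrom_count (s : List Int) : ∀ (v c : Int),
    s.Pairwise (· ≤ ·) → (∀ y ∈ s, v ≤ y) →
    ∀ w c', (w, c') ∈ pvRunsFrom v c s →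
      c' = if w = v then c + (s.count v : Int) else (s.count w : Int) := by
  induction s with
  | nil =>
    intro v c _ _ w c' hm
    simp [pvRunsFrom] at hm
    simp [hm.1, hm.2]
  | cons x xs ih =>
    intro v c hp hle w c' hm
    rcases List.pairwise_cons.mp hp with ⟨hx, hxs⟩
    by_cases h : v = x
    · subst h
      have := ih v (c + 1) hxs hx w c' (by simpa [pvRunsFrom] using hm)
      by_cases hwv : w = v
      · simp [hwv] at this ⊢
        simp [this]
        ring
      · simp [hwv] at this ⊢
        simp [List.count_cons, this]
        omega
    · have hvx : v < x := lt_of_le_of_ne (hle x (by simp)) h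
      have hvnot : v ∉ x :: xs := by
        simp only [List.mem_cons, not_or]
        exact ⟨by omega, fun hmem => by have := hx v hmem; omega⟩
      simp only [pvRunsFrom, if_neg h, List.mem_cons] at hm
      rcases hm with hm | hm
      · have hw : w = v ∧ c' = c := by
          constructor <;> [exact (Prod.mk.injEq _ _ _ _ ▸ hm).1; exact (Prod.mk.injEq _ _ _ _ ▸ hm).2]
        have : (x :: xs).count v = 0 := List.count_eq_zero.mpr hvnot
        simp [hw.1, hw.2, this]
      · have hwmem : w = x ∨ w ∈ xs := by
          have := (pvRunsFrom_fst_mem xs x 1 w).mp (by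
            exact List.mem_map.mpr ⟨(w, c'), hm, rfl⟩)
          exact this
        have hwne : w ≠ v := by
          rcases hwmem with h1 | h1
          · omega
          · have := hx w h1; omega
        have := ih x 1 hxs hx w c' hm
        by_cases hwx : w = x
        · simp [hwx] at this ⊢
          simp [if_neg (by omega : ¬ (x = v)), List.count_cons, this]
          ring
        · simp [hwx] at this
          simp [if_neg hwne, List.count_cons, this]
          omega

-- the adjacent-pair scan over strictly increasing runs equals the pvStepf fold over the values
theorem pvPairFold (l : List Int) (R : List (Int × Int)) :
    (R.map Prod.fst).Pairwise (· < ·) →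
    (∀ p ∈ R, p.2 = (l.count p.1 : Int)) →
    (∀ w ∈ R.map Prod.fst, ((w + 1) ∈ l ↔ (w + 1) ∈ R.map Prod.fst)) →
    ∀ a, (R.zip R.tail).foldl
        (fun ans p => if p.2.1 = p.1.1 + 1 then max ans (p.1.2 + p.2.2) else ans) a
      = (R.map Prod.fst).foldl (pvStepf l) a := by
  induction R with
  | nil => intro _ _ _ a; simp
  | cons r1 t ih =>
    intro hlt hcnt hmem a
    rcases List.pairwise_cons.mp hlt with ⟨hr1, hlt'⟩
    cases t with
    | nil =>
      simp only [List.zip_nil_right, List.tail_cons]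
      have hnot : (r1.1 + 1) ∉ l := by
        intro hc
        have h2 := (hmem r1.1 (by simp)).mp hc
        have h3 : r1.1 + 1 = r1.1 := by simpa using h2
        omega
      simp [pvStepf, hnot]
    | cons r2 t' =>
      have hr12 : r1.1 < r2.1 := hr1 r2.1 (by simp)
      have hmem' : ∀ w ∈ (r2 :: t').map Prod.fst, ((w + 1) ∈ l ↔ (w + 1) ∈ (r2 :: t').map Prod.fst) := by
        intro w hw
        rw [hmem w (List.mem_cons_of_mem _ hw)]
        constructor
        · intro hc
          rcases List.mem_cons.mp hc with hc | hc
          · exfalso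
            have := hr1 w hw
            omega
          · exact hc
        · intro hc; exact List.mem_cons_of_mem _ hc
      have hcnt' : ∀ p ∈ (r2 :: t'), p.2 = (l.count p.1 : Int) := fun p hp => hcnt p (List.mem_cons_of_mem _ hp)
      have step_eq : ∀ a, (if r2.1 = r1.1 + 1 then max a (r1.2 + r2.2) else a) = pvStepf l a r1.1 := by
        intro a
        unfold pvStepf
        have hiff : (r1.1 + 1) ∈ l ↔ r2.1 = r1.1 + 1 := by
          rw [hmem r1.1 (by simp)]
          simp only [List.map_cons, List.mem_cons]
          constructor
          · intro hc
            simp only [List.mem_cons] at hc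
            rcases hc with hc | hc | hc
            · omega
            · omega
            · exfalso
              have := List.pairwise_cons.mp hlt'
              have := this.1 (r1.1 + 1) hc
              omega
          · intro hc; right; left; omega
        by_cases hc : r2.1 = r1.1 + 1
        · rw [if_pos hc, if_pos (hiff.mpr hc)]
          have e1 : r1.2 = (l.count r1.1 : Int) := hcnt r1 (by simp)
          have e2 : r2.2 = (l.count r2.1 : Int) := hcnt r2 (by simp)
          rw [e1, e2, hc]
        · rw [if_neg hc, if_neg (fun h => hc (hiff.mp h))]
      simp only [List.tail_cons, List.zip_cons_cons, List.foldl_cons, List.map_cons]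
      rw [step_eq a]
      exact ih hlt' hcnt' hmem' (pvStepf l a r1.1)

theorem pvStepf_rightcomm (l : List Int) (a x y : Int) :
    pvStepf l (pvStepf l a x) y = pvStepf l (pvStepf l a y) x := by
  unfold pvStepf
  split_ifs <;> simp [max_right_comm]

theorem pvFoldl_perm (l : List Int) {K V : List Int} (h : K.Perm V) (a : Int) :
    K.foldl (pvStepf l) a = V.foldl (pvStepf l) a :=
  @List.Perm.foldl_eq _ _ (pvStepf l) K V ⟨fun b x y => pvStepf_rightcomm l b x y⟩ h a

-- A's program equals the pvStepf fold over set(l)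
theorem pvA_char (l : List Int) :
    find_balanced_subsequence l = (PySem.Set.ofList l).foldl (pvStepf l) 0 := by
  have hf : (fun ans j => if (PySem.Dict.counter l).contains (j + 1) then
        max ans ((PySem.Dict.counter l).getD j 0 + (PySem.Dict.counter l).getD (j + 1) 0) else ans)
      = pvStepf l := by
    funext ans j
    simp [pvStepf, PySem.Dict.getD_counter, PySem.Dict.contains_counter]
  simp only [find_balanced_subsequence, PySem.Dict.foldl_insert_getD_add_one_eq_counter,
    PySem.Dict.keys_counter, hf]

theorem pvRuns_eq (x : Int) (xs : List Int) :
    ((x :: xs).foldl pvRStep []).reverse = pvRunsFrom x 1 xs := by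
  have h1 : (x :: xs).foldl pvRStep [] = xs.foldl pvRStep [(x, 1)] := by
    simp [pvRStep]
  rw [h1]
  simpa using pvFoldl_rstep xs x 1 []

-- B's program equals the pvStepf fold over the run values
theorem pvB_char (l : List Int) :
    find_balanced_subsequence_alt l
      = ((((PySem.List.sorted l (fun x => x) false).foldl pvRStep []).reverse).map Prod.fst).foldl (pvStepf l) 0 := by
  have hperm : (PySem.List.sorted l (fun x => x) false).Perm l :=
    PySem.List.sorted_perm l (fun x => x) false
  have hpair : (PySem.List.sorted l (fun x => x) false).Pairwise (· ≤ ·) := by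
    simpa using PySem.List.sorted_pairwise l (fun x => x)
  unfold find_balanced_subsequence_alt pvScanRuns
  cases hsv : PySem.List.sorted l (fun x => x) false with
  | nil => rfl
  | cons x xs =>
    rw [hsv] at hperm hpair
    rcases List.pairwise_cons.mp hpair with ⟨hx, hxs⟩
    rw [pvRuns_eq]
    have hcount : ∀ w, (x :: xs).count w = l.count w := fun w => hperm.count_eq w
    apply pvPairFold l (pvRunsFrom x 1 xs)
    · exact pvRunsFrom_fst_lt xs x 1 hxs hx
    · intro p hp
      have := pvRunsFrom_count xs x 1 hxs hx p.1 p.2 (by simpa using hp)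
      by_cases hpx : p.1 = x
      · simp [hpx] at this
        rw [this, hpx, ← hcount x]
        simp
        ring
      · simp [hpx] at this
        rw [this, ← hcount p.1]
        simp [List.count_cons]
        omega
    · intro w _
      rw [show ((w + 1) ∈ l ↔ (w + 1) = x ∨ (w + 1) ∈ xs) by rw [← hperm.mem_iff]; simp]
      rw [pvRunsFrom_fst_mem]

-- ===== VERDICT (by name: the statement is the Claim_ definition above) =====
theorem find_balanced_subsequence_spec : Claim_equal_find_balanced_subsequence := by
  intro l _
  unfold Spec_find_balanced_subsequence
  rw [pvA_char, pvB_char]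
  apply pvFoldl_perm
  have hperm : (PySem.List.sorted l (fun x => x) false).Perm l :=
    PySem.List.sorted_perm l (fun x => x) false
  have hpair : (PySem.List.sorted l (fun x => x) false).Pairwise (· ≤ ·) := by
    simpa using PySem.List.sorted_pairwise l (fun x => x)
  cases hsv : PySem.List.sorted l (fun x => x) false with
  | nil =>
    have hl : l = [] := by
      have := hperm; rw [hsv] at this
      exact this.nil_eq.symm
    subst hl; rfl
  | cons x xs =>
    rw [hsv] at hperm hpair
    rcases List.pairwise_cons.mp hpair with ⟨hx, hxs⟩
    rw [pvRuns_eq]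
    apply (List.perm_ext_iff_of_nodup (PySem.Set.nodup_ofList l) ((pvRunsFrom_fst_lt xs x 1 hxs hx).nodup)).mpr
    intro w
    rw [PySem.Set.mem_ofList, pvRunsFrom_fst_mem, ← hperm.mem_iff]
    simp
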